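-- pv_equiv track=rewrite | github.com/ice-waves/suanfa | invest_finance.py | investFinance
-- ===== SOURCE A (Python) =====
-- from typing import List
--
-- def investFinance(
--     productsNum: int,
--     totalInvestmentAmount: int,
--     totalRisk: int,
--     productsRate: List[int],
--     productsRisk: List[int],
--     productsMaxInvest: List[int],
-- ) -> List[int]:
--     if productsNum == 0:
--         return []
--     elif productsNum == 1:
--         if productsRisk[0] > totalRisk:
--             return []
--         else:
--             return productsMaxInvest
--
--     tempTotalRisk = 0
--     totalReturnInvestment = 0
--     productsInvestResult = [0 for _ in range(productsNum)]
--
--     productsInvestMap = {}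
--
--     for i in range(productsNum):
--         # 只取一个产品
--         tempTotalRisk = productsRisk[i]
--         if tempTotalRisk > totalRisk:
--           continue
--
--         totalReturnInvestment = productsRate[i]*productsMaxInvest[i]
--         productsInvestResult[i] = productsMaxInvest[i]
--         productsInvestMap[totalReturnInvestment] = productsInvestResult.copy()
--         productsInvestResult = [0 for _ in range(productsNum)]
--         for j in range(i+1, productsNum):
--             # 选取两个产品
--             tempTotalRisk = productsRisk[i] + productsRisk[j]
--             if tempTotalRisk > totalRisk:
--                 continue
--
--             totalReturnInvestment = productsRate[i]*productsMaxInvest[i] + productsRate[j]*productsMaxInvest[j]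
--             productsInvestResult[i] = productsMaxInvest[i]
--             productsInvestResult[j] = productsMaxInvest[j]
--             productsInvestMap[totalReturnInvestment] = productsInvestResult.copy()
--             productsInvestResult = [0 for _ in range(productsNum)]
--
--
--
--     maxResultKey = max(productsInvestMap.keys())
--
--     return productsInvestMap[maxResultKey]
-- ===== SOURCE B (Python) =====
-- def investFinance(productsNum, totalInvestmentAmount, totalRisk, productsRate, productsRisk, productsMaxInvest):
--     # one pass over the candidate selections, tracking (value, i, j) of the best;
--     # >= keeps the later candidate, matching the dict's last-insert-wins overwrite in A
--     best = None
--     for i in range(productsNum):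
--         if productsRisk[i] <= totalRisk:
--             v = productsRate[i] * productsMaxInvest[i]
--             if best is None or v >= best[0]:
--                 best = (v, i, None)
--             for j in range(i + 1, productsNum):
--                 if productsRisk[i] + productsRisk[j] <= totalRisk:
--                     w = v + productsRate[j] * productsMaxInvest[j]
--                     if w >= best[0]:
--                         best = (w, i, j)
--     if best is None:
--         return []
--     _, bi, bj = best
--     return [productsMaxInvest[k] if (k == bi or k == bj) else 0 for k in range(productsNum)]
-- ===== Notes on version B (the rewrite author's own statement) =====
-- stated objective: faster
-- what changed: Replaces A's dict of candidate portfolios (a fresh length-n result list built and stored for every feasible product or pair, then max over the keys) with a single scan that keeps only the (value, i, j) of the best candidate seen so far (>= on ties reproduces the dict's last-insert-wins) and builds the one output list at the end.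
-- intended difference: When productsNum == 1, the first product fits the risk budget and productsMaxInvest does not have exactly one entry, A returns the whole productsMaxInvest list unchanged while B returns [productsMaxInvest[0]], the length-productsNum result vector the function returns in every other case. — e.g. on investFinance(1, 0, 0, [1, 1], [0, 0], [5, 7]): A returns [5, 7], B returns [5]
-- outside the precondition, e.g. on investFinance(1, 0, 0, [], [0], [3]): A returns [3], B raises IndexError
import Mathlib
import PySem

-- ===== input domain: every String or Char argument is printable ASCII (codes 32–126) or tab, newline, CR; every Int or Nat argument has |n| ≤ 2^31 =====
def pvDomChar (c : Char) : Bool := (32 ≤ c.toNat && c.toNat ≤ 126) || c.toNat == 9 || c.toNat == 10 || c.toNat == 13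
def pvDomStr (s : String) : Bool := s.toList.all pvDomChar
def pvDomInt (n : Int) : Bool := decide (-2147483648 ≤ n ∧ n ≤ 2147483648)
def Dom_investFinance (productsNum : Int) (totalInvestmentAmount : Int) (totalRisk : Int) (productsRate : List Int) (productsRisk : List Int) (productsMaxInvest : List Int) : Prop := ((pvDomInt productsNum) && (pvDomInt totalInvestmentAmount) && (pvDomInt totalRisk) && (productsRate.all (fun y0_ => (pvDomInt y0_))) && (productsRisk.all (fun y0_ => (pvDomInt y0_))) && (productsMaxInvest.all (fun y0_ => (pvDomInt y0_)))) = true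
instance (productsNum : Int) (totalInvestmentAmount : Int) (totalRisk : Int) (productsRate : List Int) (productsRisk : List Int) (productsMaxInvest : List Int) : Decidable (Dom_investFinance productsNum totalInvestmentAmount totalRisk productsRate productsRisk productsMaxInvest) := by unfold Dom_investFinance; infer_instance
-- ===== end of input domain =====

-- B replaces A's dict of per-candidate result lists (one fresh length-n list per feasible product/pair,
-- then max over the dict keys) with a single best-(value, i, j) scan that builds the output list once;
-- on productsNum == 1 with an oversized productsMaxInvest, B returns the length-1 vector (see D_ below).

-- ===== PORT A =====
-- pyGetD/pySetD are exact here: Pre_ guarantees every accessed index is in range.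
def investFinance (productsNum : Int) (totalInvestmentAmount : Int) (totalRisk : Int) (productsRate : List Int) (productsRisk : List Int) (productsMaxInvest : List Int) : List Int :=
  if productsNum = 0 then []
  else if productsNum = 1 then
    (if PySem.List.pyGetD productsRisk 0 0 > totalRisk then [] else productsMaxInvest)
  else
    let d :=
      (PySem.List.pyRange 0 productsNum 1).foldl
        (fun (d : PySem.Dict Int (List Int)) i =>
          if PySem.List.pyGetD productsRisk i 0 > totalRisk then d
          else
            let d := d.insert (PySem.List.pyGetD productsRate i 0 * PySem.List.pyGetD productsMaxInvest i 0)
              (PySem.List.pySetD ((PySem.List.pyRange 0 productsNum 1).map (fun _ => (0 : Int))) i (PySem.List.pyGetD productsMaxInvest i 0))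
            (PySem.List.pyRange (i + 1) productsNum 1).foldl
              (fun (d : PySem.Dict Int (List Int)) j =>
                if PySem.List.pyGetD productsRisk i 0 + PySem.List.pyGetD productsRisk j 0 > totalRisk then d
                else
                  d.insert (PySem.List.pyGetD productsRate i 0 * PySem.List.pyGetD productsMaxInvest i 0 + PySem.List.pyGetD productsRate j 0 * PySem.List.pyGetD productsMaxInvest j 0)
                    (PySem.List.pySetD (PySem.List.pySetD ((PySem.List.pyRange 0 productsNum 1).map (fun _ => (0 : Int))) i (PySem.List.pyGetD productsMaxInvest i 0)) j (PySem.List.pyGetD productsMaxInvest j 0))) d)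
        PySem.Dict.empty
    match PySem.List.max? d.keys (fun x => x) with
    | none => []        -- Python: max() of the empty dict raises ValueError (outside Pre_)
    | some m => d.getD m []

-- ===== PORT B =====
def investFinance_alt (productsNum : Int) (totalInvestmentAmount : Int) (totalRisk : Int) (productsRate : List Int) (productsRisk : List Int) (productsMaxInvest : List Int) : List Int :=
  let best :=
    (PySem.List.pyRange 0 productsNum 1).foldl
      (fun (best : Option (Int × Int × Option Int)) i =>
        if PySem.List.pyGetD productsRisk i 0 ≤ totalRisk then
          let v := PySem.List.pyGetD productsRate i 0 * PySem.List.pyGetD productsMaxInvest i 0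
          let best :=
            match best with
            | none => some (v, i, (none : Option Int))
            | some b => if v ≥ b.1 then some (v, i, (none : Option Int)) else some b
          (PySem.List.pyRange (i + 1) productsNum 1).foldl
            (fun (best : Option (Int × Int × Option Int)) j =>
              if PySem.List.pyGetD productsRisk i 0 + PySem.List.pyGetD productsRisk j 0 ≤ totalRisk then
                match best with
                | none => none  -- unreachable: best was set before the inner loop
                | some b =>
                  if v + PySem.List.pyGetD productsRate j 0 * PySem.List.pyGetD productsMaxInvest j 0 ≥ b.1 then
                    some (v + PySem.List.pyGetD productsRate j 0 * PySem.List.pyGetD productsMaxInvest j 0, i, some j)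
                  else some b
              else best) best
        else best)
      (none : Option (Int × Int × Option Int))
  match best with
  | none => []
  | some b =>
    (PySem.List.pyRange 0 productsNum 1).map
      (fun k => if k = b.2.1 ∨ some k = b.2.2 then PySem.List.pyGetD productsMaxInvest k 0 else 0)

-- ===== PRECONDITION & SPEC =====
-- Pre_ excludes (a) inputs where A raises: a list shorter than productsNum (IndexError), or productsNum
-- negative / ≥ 2 with no single product inside the risk budget (ValueError from max() of an empty dict);
-- (b) inputs where A's 1-product shortcut returns although other lists are too short for B (see cites).
def Pre_investFinance (productsNum : Int) (totalInvestmentAmount : Int) (totalRisk : Int) (productsRate : List Int) (productsRisk : List Int) (productsMaxInvest : List Int) : Prop :=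
  productsNum ≤ (productsRate.length : Int) ∧ productsNum ≤ (productsRisk.length : Int) ∧
  productsNum ≤ (productsMaxInvest.length : Int) ∧
  (productsNum = 0 ∨ productsNum = 1 ∨ ∃ r ∈ productsRisk.take productsNum.toNat, r ≤ totalRisk)
instance (productsNum : Int) (totalInvestmentAmount : Int) (totalRisk : Int) (productsRate : List Int) (productsRisk : List Int) (productsMaxInvest : List Int) : Decidable (Pre_investFinance productsNum totalInvestmentAmount totalRisk productsRate productsRisk productsMaxInvest) := by unfold Pre_investFinance; infer_instance
def pvWitness_investFinance : Int × Int × Int × List Int × List Int × List Int := (2, 0, 5, [1, 2], [1, 1], [3, 4])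

-- When productsNum = 1, the first product fits the risk budget and productsMaxInvest does not have
-- exactly one entry, A returns the whole productsMaxInvest list unchanged while B returns
-- [productsMaxInvest[0]], the length-productsNum result vector the function returns in every other case.
def D_investFinance (productsNum : Int) (totalInvestmentAmount : Int) (totalRisk : Int) (productsRate : List Int) (productsRisk : List Int) (productsMaxInvest : List Int) : Prop :=
  productsNum = 1 ∧ 1 ≤ productsRisk.length ∧ productsRisk.getD 0 0 ≤ totalRisk ∧ productsMaxInvest.length ≠ 1
instance (productsNum : Int) (totalInvestmentAmount : Int) (totalRisk : Int) (productsRate : List Int) (productsRisk : List Int) (productsMaxInvest : List Int) : Decidable (D_investFinance productsNum totalInvestmentAmount totalRisk productsRate productsRisk productsMaxInvest) := by unfold D_investFinance; infer_instance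

def Spec_investFinance (productsNum : Int) (totalInvestmentAmount : Int) (totalRisk : Int) (productsRate : List Int) (productsRisk : List Int) (productsMaxInvest : List Int) (out : List Int) : Prop := ¬ D_investFinance productsNum totalInvestmentAmount totalRisk productsRate productsRisk productsMaxInvest → out = investFinance_alt productsNum totalInvestmentAmount totalRisk productsRate productsRisk productsMaxInvest
instance (productsNum : Int) (totalInvestmentAmount : Int) (totalRisk : Int) (productsRate : List Int) (productsRisk : List Int) (productsMaxInvest : List Int) (out : List Int) : Decidable (Spec_investFinance productsNum totalInvestmentAmount totalRisk productsRate productsRisk productsMaxInvest out) := by unfold Spec_investFinance; infer_instance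

def pvDiffWitness_investFinance : Int × Int × Int × List Int × List Int × List Int := (1, 0, 0, [1, 1], [0, 0], [5, 7])
def pvDiffWitnessOut_investFinance : (List Int) × (List Int) := ([5, 7], [5])

-- ===== CLAIM (what is proved, stated in full; the proofs are below) =====
def Claim_unchanged_investFinance : Prop := ∀ (productsNum : Int) (totalInvestmentAmount : Int) (totalRisk : Int) (productsRate : List Int) (productsRisk : List Int) (productsMaxInvest : List Int), Dom_investFinance productsNum totalInvestmentAmount totalRisk productsRate productsRisk productsMaxInvest → Pre_investFinance productsNum totalInvestmentAmount totalRisk productsRate productsRisk productsMaxInvest → Spec_investFinance productsNum totalInvestmentAmount totalRisk productsRate productsRisk productsMaxInvest (investFinance productsNum totalInvestmentAmount totalRisk productsRate productsRisk productsMaxInvest)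
def Claim_changed_investFinance : Prop := Dom_investFinance (pvDiffWitness_investFinance.1) (pvDiffWitness_investFinance.2.1) (pvDiffWitness_investFinance.2.2.1) (pvDiffWitness_investFinance.2.2.2.1) (pvDiffWitness_investFinance.2.2.2.2.1) (pvDiffWitness_investFinance.2.2.2.2.2) ∧ Pre_investFinance (pvDiffWitness_investFinance.1) (pvDiffWitness_investFinance.2.1) (pvDiffWitness_investFinance.2.2.1) (pvDiffWitness_investFinance.2.2.2.1) (pvDiffWitness_investFinance.2.2.2.2.1) (pvDiffWitness_investFinance.2.2.2.2.2) ∧ D_investFinance (pvDiffWitness_investFinance.1) (pvDiffWitness_investFinance.2.1) (pvDiffWitness_investFinance.2.2.1) (pvDiffWitness_investFinance.2.2.2.1) (pvDiffWitness_investFinance.2.2.2.2.1) (pvDiffWitness_investFinance.2.2.2.2.2) ∧ investFinance (pvDiffWitness_investFinance.1) (pvDiffWitness_investFinance.2.1) (pvDiffWitness_investFinance.2.2.1) (pvDiffWitness_investFinance.2.2.2.1) (pvDiffWitness_investFinance.2.2.2.2.1) (pvDiffWitness_investFinance.2.2.2.2.2) = pvDiffWitnessOut_investFinance.1 ∧ investFinance_alt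 (pvDiffWitness_investFinance.1) (pvDiffWitness_investFinance.2.1) (pvDiffWitness_investFinance.2.2.1) (pvDiffWitness_investFinance.2.2.2.1) (pvDiffWitness_investFinance.2.2.2.2.1) (pvDiffWitness_investFinance.2.2.2.2.2) = pvDiffWitnessOut_investFinance.2 ∧ pvDiffWitnessOut_investFinance.1 ≠ pvDiffWitnessOut_investFinance.2
def Claim_exact_investFinance : Prop := ∀ (productsNum : Int) (totalInvestmentAmount : Int) (totalRisk : Int) (productsRate : List Int) (productsRisk : List Int) (productsMaxInvest : List Int), Dom_investFinance productsNum totalInvestmentAmount totalRisk productsRate productsRisk productsMaxInvest → Pre_investFinance productsNum totalInvestmentAmount totalRisk productsRate productsRisk productsMaxInvest → D_investFinance productsNum totalInvestmentAmount totalRisk productsRate productsRisk productsMaxInvest → investFinance productsNum totalInvestmentAmount totalRisk productsRate productsRisk productsMaxInvest ≠ investFinance_alt productsNum totalInvestmentAmount totalRisk productsRate productsRisk productsMaxInvest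
-- ===== LEMMAS AND PROOFS =====

-- the best-candidate update step of B (B's two match-expressions are definitionally pvStep)
def pvStep (acc : Option (Int × Int × Option Int)) (c : Int × Int × Option Int) : Option (Int × Int × Option Int) :=
  match acc with
  | none => some c
  | some b => if c.1 ≥ b.1 then some c else some b

-- the result list A stores in the dict for a candidate
def pvVec (n : Int) (maxInv : List Int) (b : Int × Int × Option Int) : List Int :=
  match b.2.2 with
  | none => PySem.List.pySetD ((PySem.List.pyRange 0 n 1).map (fun _ => (0 : Int))) b.2.1 (PySem.List.pyGetD maxInv b.2.1 0)
  | some j => PySem.List.pySetD (PySem.List.pySetD ((PySem.List.pyRange 0 n 1).map (fun _ => (0 : Int))) b.2.1 (PySem.List.pyGetD maxInv b.2.1 0)) j (PySem.List.pyGetD maxInv j 0)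

def pvGood (n : Int) (b : Int × Int × Option Int) : Prop :=
  0 ≤ b.2.1 ∧ b.2.1 < n ∧ ∀ j, b.2.2 = some j → b.2.1 < j ∧ j < n

-- invariant relating A's dict to B's best candidate
def pvInv (n : Int) (maxInv : List Int) (d : PySem.Dict Int (List Int)) (acc : Option (Int × Int × Option Int)) : Prop :=
  match acc with
  | none => d.items = []
  | some b => pvGood n b ∧ PySem.List.max? d.keys (fun x => x) = some b.1 ∧ d.getD b.1 [] = pvVec n maxInv b

lemma pv_max?_eq_some {l : List Int} {m : Int} (h1 : m ∈ l) (h2 : ∀ y ∈ l, y ≤ m) :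
    PySem.List.max? l (fun x => x) = some m := by
  cases l with
  | nil => cases h1
  | cons x t =>
    rw [PySem.List.max?_id_cons]
    have hfold := PySem.List.le_foldl_max t x
    have hmem := PySem.List.foldl_max_mem t x
    have h3 : t.foldl max x ≤ m := by
      rcases hmem with h | h
      · rw [h]; exact h2 x (by simp)
      · exact h2 _ (by simp [h])
    have h4 : m ≤ t.foldl max x := by
      rcases List.mem_cons.1 h1 with rfl | hm
      · exact hfold.1
      · exact hfold.2 _ hm
    have : t.foldl max x = m := le_antisymm h3 h4
    rw [this]

lemma pvInv_step (n : Int) (maxInv : List Int) (d : PySem.Dict Int (List Int))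
    (acc : Option (Int × Int × Option Int)) (c : Int × Int × Option Int)
    (hg : pvGood n c) (h : pvInv n maxInv d acc) :
    pvInv n maxInv (d.insert c.1 (pvVec n maxInv c)) (pvStep acc c) := by
  cases acc with
  | none =>
    have hd : d = PySem.Dict.empty := PySem.Dict.ext (by simpa [pvInv] using h)
    subst hd
    refine ⟨hg, ?_, by simp [PySem.Dict.getD_insert_self]⟩
    apply pv_max?_eq_some
    · exact (PySem.Dict.mem_keys_insert _ _ _ _).2 (Or.inl rfl)
    · intro y hy
      rcases (PySem.Dict.mem_keys_insert _ _ _ _).1 hy with rfl | hy'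
      · exact le_refl _
      · simp [PySem.Dict.keys_empty] at hy'
  | some b =>
    obtain ⟨hgb, hmax, hget⟩ := h
    by_cases hge : c.1 ≥ b.1
    · have hstep : pvStep (some b) c = some c := by simp [pvStep, hge]
      rw [hstep]
      refine ⟨hg, ?_, by simp [PySem.Dict.getD_insert_self]⟩
      apply pv_max?_eq_some
      · exact (PySem.Dict.mem_keys_insert _ _ _ _).2 (Or.inl rfl)
      · intro y hy
        rcases (PySem.Dict.mem_keys_insert _ _ _ _).1 hy with rfl | hy'
        · exact le_refl _
        · exact le_trans (PySem.List.max?_isMax hmax y hy') hge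
    · have hstep : pvStep (some b) c = some b := by simp [pvStep, hge]
      rw [hstep]
      have hne : b.1 ≠ c.1 := by intro hEq; exact hge (le_of_eq hEq)
      refine ⟨hgb, ?_, ?_⟩
      · apply pv_max?_eq_some
        · exact (PySem.Dict.mem_keys_insert _ _ _ _).2 (Or.inr (PySem.List.max?_mem hmax))
        · intro y hy
          rcases (PySem.Dict.mem_keys_insert _ _ _ _).1 hy with rfl | hy'
          · exact le_of_not_ge hge
          · exact PySem.List.max?_isMax hmax y hy'
      · rw [PySem.Dict.getD_insert_of_ne _ _ _ hne]
        exact hget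

-- inner loop of both ports preserves the invariant
lemma pvInner (n R : Int) (rate risk maxInv : List Int) (i : Int) (hi0 : 0 ≤ i) (hin : i < n) :
    ∀ (l : List Int) (d : PySem.Dict Int (List Int)) (b : Int × Int × Option Int),
      (∀ j ∈ l, i < j ∧ j < n) → pvInv n maxInv d (some b) →
      pvInv n maxInv
        (l.foldl (fun d j =>
          if PySem.List.pyGetD risk i 0 + PySem.List.pyGetD risk j 0 > R then d
          else
            d.insert (PySem.List.pyGetD rate i 0 * PySem.List.pyGetD maxInv i 0 + PySem.List.pyGetD rate j 0 * PySem.List.pyGetD maxInv j 0)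
              (PySem.List.pySetD (PySem.List.pySetD ((PySem.List.pyRange 0 n 1).map (fun _ => (0 : Int))) i (PySem.List.pyGetD maxInv i 0)) j (PySem.List.pyGetD maxInv j 0))) d)
        (l.foldl (fun best j =>
          if PySem.List.pyGetD risk i 0 + PySem.List.pyGetD risk j 0 ≤ R then
            match best with
            | none => none
            | some b =>
              if PySem.List.pyGetD rate i 0 * PySem.List.pyGetD maxInv i 0 + PySem.List.pyGetD rate j 0 * PySem.List.pyGetD maxInv j 0 ≥ b.1 then
                some (PySem.List.pyGetD rate i 0 * PySem.List.pyGetD maxInv i 0 + PySem.List.pyGetD rate j 0 * PySem.List.pyGetD maxInv j 0, i, some j)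
              else some b
          else best) (some b)) := by
  intro l
  induction l with
  | nil => intro d b _ h; simpa using h
  | cons j t ih =>
    intro d b hb h
    simp only [List.foldl_cons]
    by_cases hc : PySem.List.pyGetD risk i 0 + PySem.List.pyGetD risk j 0 ≤ R
    · rw [if_neg (not_lt.mpr hc), if_pos hc]
      have hg : pvGood n (PySem.List.pyGetD rate i 0 * PySem.List.pyGetD maxInv i 0 + PySem.List.pyGetD rate j 0 * PySem.List.pyGetD maxInv j 0, i, some j) := by
        refine ⟨hi0, hin, ?_⟩
        intro j' hj'
        cases hj'
        exact hb j (by simp)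
      have hstep := pvInv_step n maxInv d (some b) _ hg h
      by_cases hw : PySem.List.pyGetD rate i 0 * PySem.List.pyGetD maxInv i 0 + PySem.List.pyGetD rate j 0 * PySem.List.pyGetD maxInv j 0 ≥ b.1
      · have : pvStep (some b) (PySem.List.pyGetD rate i 0 * PySem.List.pyGetD maxInv i 0 + PySem.List.pyGetD rate j 0 * PySem.List.pyGetD maxInv j 0, i, some j) = some (PySem.List.pyGetD rate i 0 * PySem.List.pyGetD maxInv i 0 + PySem.List.pyGetD rate j 0 * PySem.List.pyGetD maxInv j 0, i, some j) := by
          simp [pvStep, hw]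
        rw [this] at hstep
        rw [if_pos hw]
        exact ih _ _ (fun j' hj' => hb j' (by simp [hj'])) hstep
      · have : pvStep (some b) (PySem.List.pyGetD rate i 0 * PySem.List.pyGetD maxInv i 0 + PySem.List.pyGetD rate j 0 * PySem.List.pyGetD maxInv j 0, i, some j) = some b := by
          simp [pvStep, hw]
        rw [this] at hstep
        rw [if_neg hw]
        exact ih _ _ (fun j' hj' => hb j' (by simp [hj'])) hstep
    · rw [if_pos (not_le.mp hc), if_neg hc]
      exact ih _ _ (fun j' hj' => hb j' (by simp [hj'])) h

-- outer loop of both ports preserves the invariant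
lemma pvOuter (n R : Int) (rate risk maxInv : List Int) :
    ∀ (l : List Int) (d : PySem.Dict Int (List Int)) (acc : Option (Int × Int × Option Int)),
      (∀ i ∈ l, 0 ≤ i ∧ i < n) → pvInv n maxInv d acc →
      pvInv n maxInv
        (l.foldl (fun d i =>
          if PySem.List.pyGetD risk i 0 > R then d
          else
            (PySem.List.pyRange (i + 1) n 1).foldl
              (fun d j =>
                if PySem.List.pyGetD risk i 0 + PySem.List.pyGetD risk j 0 > R then d
                else
                  d.insert (PySem.List.pyGetD rate i 0 * PySem.List.pyGetD maxInv i 0 + PySem.List.pyGetD rate j 0 * PySem.List.pyGetD maxInv j 0)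
                    (PySem.List.pySetD (PySem.List.pySetD ((PySem.List.pyRange 0 n 1).map (fun _ => (0 : Int))) i (PySem.List.pyGetD maxInv i 0)) j (PySem.List.pyGetD maxInv j 0)))
              (d.insert (PySem.List.pyGetD rate i 0 * PySem.List.pyGetD maxInv i 0)
                (PySem.List.pySetD ((PySem.List.pyRange 0 n 1).map (fun _ => (0 : Int))) i (PySem.List.pyGetD maxInv i 0)))) d)
        (l.foldl (fun best i =>
          if PySem.List.pyGetD risk i 0 ≤ R then
            (PySem.List.pyRange (i + 1) n 1).foldl
              (fun best j =>
                if PySem.List.pyGetD risk i 0 + PySem.List.pyGetD risk j 0 ≤ R then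
                  match best with
                  | none => none
                  | some b =>
                    if PySem.List.pyGetD rate i 0 * PySem.List.pyGetD maxInv i 0 + PySem.List.pyGetD rate j 0 * PySem.List.pyGetD maxInv j 0 ≥ b.1 then
                      some (PySem.List.pyGetD rate i 0 * PySem.List.pyGetD maxInv i 0 + PySem.List.pyGetD rate j 0 * PySem.List.pyGetD maxInv j 0, i, some j)
                    else some b
                else best)
              (match best with
               | none => some (PySem.List.pyGetD rate i 0 * PySem.List.pyGetD maxInv i 0, i, (none : Option Int))
               | some b => if PySem.List.pyGetD rate i 0 * PySem.List.pyGetD maxInv i 0 ≥ b.1 then some (PySem.List.pyGetD rate i 0 * PySem.List.pyGetD maxInv i 0, i, (none : Option Int)) else some b)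
          else best) acc) := by
  intro l
  induction l with
  | nil => intro d acc _ h; simpa using h
  | cons i t ih =>
    intro d acc hbound h
    have hib := hbound i (by simp)
    simp only [List.foldl_cons]
    by_cases hfeas : PySem.List.pyGetD risk i 0 ≤ R
    · rw [if_neg (not_lt.mpr hfeas), if_pos hfeas]
      have hg : pvGood n (PySem.List.pyGetD rate i 0 * PySem.List.pyGetD maxInv i 0, i, (none : Option Int)) := by
        refine ⟨hib.1, hib.2, ?_⟩
        intro j hj; cases hj
      have hstep := pvInv_step n maxInv d acc _ hg h
      have hbt : ∀ j ∈ PySem.List.pyRange (i + 1) n 1, i < j ∧ j < n := fun j hj => by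
        have := (PySem.List.mem_pyRange_one).1 hj
        exact ⟨by omega, this.2⟩
      have ht : ∀ i' ∈ t, 0 ≤ i' ∧ i' < n := fun i' hi' => hbound i' (by simp [hi'])
      cases acc with
      | none =>
        simp only [pvStep] at hstep
        exact ih _ _ ht (pvInner n R rate risk maxInv i hib.1 hib.2 _ _ _ hbt hstep)
      | some b =>
        have hred : (match (some b : Option (Int × Int × Option Int)) with
            | none => some (PySem.List.pyGetD rate i 0 * PySem.List.pyGetD maxInv i 0, i, (none : Option Int))
            | some b => if PySem.List.pyGetD rate i 0 * PySem.List.pyGetD maxInv i 0 ≥ b.1 then some (PySem.List.pyGetD rate i 0 * PySem.List.pyGetD maxInv i 0, i, (none : Option Int)) else some b)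
            = pvStep (some b) (PySem.List.pyGetD rate i 0 * PySem.List.pyGetD maxInv i 0, i, (none : Option Int)) := rfl
        rw [hred]
        obtain ⟨b', hb'⟩ : ∃ b', pvStep (some b) (PySem.List.pyGetD rate i 0 * PySem.List.pyGetD maxInv i 0, i, (none : Option Int)) = some b' := by
          by_cases hw : PySem.List.pyGetD rate i 0 * PySem.List.pyGetD maxInv i 0 ≥ b.1
          · exact ⟨(PySem.List.pyGetD rate i 0 * PySem.List.pyGetD maxInv i 0, i, (none : Option Int)), by simp [pvStep, hw]⟩
          · exact ⟨b, by simp [pvStep, hw]⟩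
        rw [hb'] at hstep ⊢
        exact ih _ _ ht (pvInner n R rate risk maxInv i hib.1 hib.2 _ _ _ hbt hstep)
    · rw [if_pos (not_le.mp hfeas), if_neg hfeas]
      exact ih _ _ (fun i' hi' => hbound i' (by simp [hi'])) h

-- A's stored result list equals B's output comprehension for an in-range candidate
lemma pvVec_eq_build (n : Int) (maxInv : List Int) (b : Int × Int × Option Int) (hg : pvGood n b) :
    pvVec n maxInv b =
      (PySem.List.pyRange 0 n 1).map
        (fun k => if k = b.2.1 ∨ some k = b.2.2 then PySem.List.pyGetD maxInv k 0 else 0) := by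
  obtain ⟨v, i, oj⟩ := b
  obtain ⟨hi0, hin, hoj⟩ := hg
  simp only at hi0 hin hoj
  cases oj with
  | none =>
    simp only [pvVec]
    rw [PySem.List.pySetD_of_nonneg _ _ hi0]
    apply List.ext_getElem
    · simp
    · intro k hk1 hk2
      simp only [List.getElem_set, List.getElem_map, PySem.List.getElem_pyRange_one]
      split_ifs with h1 h2 h2
      · congr 1; omega
      · exact absurd (Or.inl (by omega)) h2
      · rcases h2 with h | h
        · omega
        · cases h
      · rfl
  | some j =>
    have hj := hoj j rfl
    simp only [pvVec]
    rw [PySem.List.pySetD_of_nonneg _ _ hi0, PySem.List.pySetD_of_nonneg _ _ (by omega : (0 : Int) ≤ j)]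
    apply List.ext_getElem
    · simp
    · intro k hk1 hk2
      simp only [List.getElem_set, List.getElem_map, PySem.List.getElem_pyRange_one]
      split_ifs with h1 h2 h3 h4 h5
      · congr 1; omega
      · exact absurd (Or.inr (by simp; omega)) h2
      · congr 1; omega
      · exact absurd (Or.inl (by omega)) h4
      · rcases h5 with h | h
        · omega
        · simp only [Option.some.injEq] at h
          omega
      · rfl

-- combine: the final answers of the two ports agree under the invariant
def pvAns (d : PySem.Dict Int (List Int)) : List Int :=
  match PySem.List.max? d.keys (fun x => x) with
  | none => []
  | some m => d.getD m []

def pvOut (n : Int) (maxInv : List Int) (acc : Option (Int × Int × Option Int)) : List Int :=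
  match acc with
  | none => []
  | some b => (PySem.List.pyRange 0 n 1).map
      (fun k => if k = b.2.1 ∨ some k = b.2.2 then PySem.List.pyGetD maxInv k 0 else 0)

lemma pvFinal (n : Int) (maxInv : List Int) (d : PySem.Dict Int (List Int))
    (acc : Option (Int × Int × Option Int)) (h : pvInv n maxInv d acc) :
    pvAns d = pvOut n maxInv acc := by
  cases acc with
  | none =>
    have hitems : d.items = [] := h
    have hk : d.keys = [] := by
      simp only [PySem.Dict.keys, hitems, List.map_nil]
    unfold pvAns pvOut
    rw [hk, (PySem.List.max?_eq_none_iff [] _).2 rfl]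
  | some b =>
    obtain ⟨hg, hmax, hget⟩ := h
    unfold pvAns pvOut
    calc (match PySem.List.max? d.keys (fun x => x) with
          | none => ([] : List Int)
          | some m => d.getD m [])
        = d.getD b.1 [] := by rw [hmax]
      _ = pvVec n maxInv b := hget
      _ = _ := pvVec_eq_build n maxInv b hg

-- ===== VERDICT (by name: the statement is the Claim_ definition above) =====
theorem investFinance_spec : Claim_unchanged_investFinance := by
  intro n amt R rate risk maxInv _hDom hPre hD
  obtain ⟨hlr, hlk, hlm, hfeas⟩ := hPre
  unfold investFinance investFinance_alt
  by_cases h0 : n = 0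
  · subst h0
    simp [PySem.List.pyRange_one_eq_nil]
  · by_cases h1 : n = 1
    · subst h1
      rw [if_neg h0, if_pos rfl]
      have hrange : PySem.List.pyRange 0 1 1 = [0] := by
        have := PySem.List.pyRange_one_singleton (a := (0 : Int))
        simpa using this
      by_cases hr : PySem.List.pyGetD risk 0 0 > R
      · rw [if_pos hr]
        simp only [hrange, List.foldl_cons, List.foldl_nil]
        rw [if_neg (by omega)]
      · rw [if_neg hr]
        have hmx : maxInv.length = 1 := by
          by_contra hne
          exact hD ⟨rfl, by omega, by
            have : PySem.List.pyGetD risk 0 0 = risk.getD 0 0 := by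
              simp [PySem.List.pyGetD_zero]
            omega, hne⟩
        obtain ⟨m, hm⟩ : ∃ m, maxInv = [m] := by
          cases maxInv with
          | nil => simp at hmx
          | cons a t => cases t with
            | nil => exact ⟨a, rfl⟩
            | cons b t' => simp at hmx
        subst hm
        simp only [hrange, List.foldl_cons, List.foldl_nil]
        rw [if_pos (by omega)]
        simp [PySem.List.pyRange_one_eq_nil]
    · rw [if_neg h0, if_neg h1]
      have hInv := pvOuter n R rate risk maxInv (PySem.List.pyRange 0 n 1) PySem.Dict.empty none
        (fun i hi => by
          have := (PySem.List.mem_pyRange_one).1 hi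
          exact ⟨this.1, this.2⟩)
        (by unfold pvInv; rfl)
      exact pvFinal n maxInv _ _ hInv

theorem investFinance_changed : Claim_changed_investFinance := by
  unfold Claim_changed_investFinance
  decide

theorem investFinance_tight : Claim_exact_investFinance := by
  intro n amt R rate risk maxInv _hDom hPre hD hEq
  obtain ⟨h1, hlen, hr, hne⟩ := hD
  subst h1
  obtain ⟨_, _, hlm, _⟩ := hPre
  have hA : investFinance 1 amt R rate risk maxInv = maxInv := by
    unfold investFinance
    rw [if_neg (by omega), if_pos rfl, if_neg (by
      have : PySem.List.pyGetD risk 0 0 = risk.getD 0 0 := by simp [PySem.List.pyGetD_zero]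
      omega)]
  have hB : (investFinance_alt 1 amt R rate risk maxInv).length = 1 := by
    unfold investFinance_alt
    have hrange : PySem.List.pyRange 0 1 1 = [0] := by
      have := PySem.List.pyRange_one_singleton (a := (0 : Int))
      simpa using this
    simp only [hrange, List.foldl_cons, List.foldl_nil]
    rw [if_pos (by
      have : PySem.List.pyGetD risk 0 0 = risk.getD 0 0 := by simp [PySem.List.pyGetD_zero]
      omega)]
    simp [PySem.List.pyRange_one_eq_nil]
  rw [← hEq, hA] at hB
  omega
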